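-- pv_equiv track=rewrite | github.com/Eenjaco/repos | mdclean_universal/csv_handler.py | detect_csv_type
-- ===== SOURCE A (Python) =====
-- from typing import List, Dict, Any, Optional
--
-- def detect_csv_type(headers: List[str]) -> str:
--     """
--     Auto-detect CSV type based on column headers.
--
--     Returns: 'financial', 'budget', 'portfolio', 'debt', or 'generic'
--     """
--     headers_lower = [h.lower() for h in headers]
--
--     # Financial transactions
--     if any(x in headers_lower for x in ['amount', 'transaction', 'description', 'date']):
--         return 'financial'
--
--     # Budget
--     if any(x in headers_lower for x in ['budgeted', 'actual', 'variance', 'category']):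
--         return 'budget'
--
--     # Portfolio/investments
--     if any(x in headers_lower for x in ['shares', 'cost_basis', 'current_value', 'gain']):
--         return 'portfolio'
--
--     # Debt tracking
--     if any(x in headers_lower for x in ['balance', 'interest_rate', 'payment', 'debt']):
--         return 'debt'
--
--     return 'generic'
-- ===== SOURCE B (Python) =====
-- _RANK = {
--     'amount': 0, 'transaction': 0, 'description': 0, 'date': 0,
--     'budgeted': 1, 'actual': 1, 'variance': 1, 'category': 1,
--     'shares': 2, 'cost_basis': 2, 'current_value': 2, 'gain': 2,
--     'balance': 3, 'interest_rate': 3, 'payment': 3, 'debt': 3,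
-- }
-- _NAME = {0: 'financial', 1: 'budget', 2: 'portfolio', 3: 'debt'}
--
-- def detect_csv_type(headers):
--     """
--     Auto-detect CSV type based on column headers.
--
--     Returns: 'financial', 'budget', 'portfolio', 'debt', or 'generic'
--     """
--     best = 4
--     for h in headers:
--         r = _RANK.get(h.lower(), 4)
--         if r < best:
--             best = r
--     return _NAME.get(best, 'generic')
-- ===== Notes on version B (the rewrite author's own statement) =====
-- stated objective: faster
-- what changed: Inverts the traversal: instead of scanning the four categories' keyword lists against the headers in staged any-checks, B makes a single pass over the headers, mapping each lowered header through a precomputed keyword-to-rank dictionary and keeping the minimum rank, which selects the category name at the end.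
import Mathlib
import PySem

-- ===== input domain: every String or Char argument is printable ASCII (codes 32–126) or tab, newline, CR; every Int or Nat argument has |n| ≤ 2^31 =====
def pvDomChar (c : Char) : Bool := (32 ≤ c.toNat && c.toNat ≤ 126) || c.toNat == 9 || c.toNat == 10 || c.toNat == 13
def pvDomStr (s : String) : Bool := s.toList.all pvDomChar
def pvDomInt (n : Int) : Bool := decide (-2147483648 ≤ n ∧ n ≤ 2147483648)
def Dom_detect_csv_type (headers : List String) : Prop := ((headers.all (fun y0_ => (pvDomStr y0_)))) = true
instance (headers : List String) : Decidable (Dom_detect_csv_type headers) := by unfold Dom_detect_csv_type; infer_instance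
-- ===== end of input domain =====

-- B inverts A's traversal: one pass over the headers keeping the minimum rank of any
-- recognised keyword (via a keyword→rank dict), instead of A's four staged category scans.

-- ===== PORT A =====
def detect_csv_type (headers : List String) : String :=
  let headers_lower := headers.map PySem.Str.lower
  if ["amount", "transaction", "description", "date"].any (fun x => headers_lower.contains x) then
    "financial"
  else if ["budgeted", "actual", "variance", "category"].any (fun x => headers_lower.contains x) then
    "budget"
  else if ["shares", "cost_basis", "current_value", "gain"].any (fun x => headers_lower.contains x) then
    "portfolio"
  else if ["balance", "interest_rate", "payment", "debt"].any (fun x => headers_lower.contains x) then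
    "debt"
  else
    "generic"

-- ===== PORT B =====
-- the module-level dict literals _RANK and _NAME
def dct_rank : PySem.Dict String Int := PySem.Dict.ofList
  [ ("amount", 0), ("transaction", 0), ("description", 0), ("date", 0),
    ("budgeted", 1), ("actual", 1), ("variance", 1), ("category", 1),
    ("shares", 2), ("cost_basis", 2), ("current_value", 2), ("gain", 2),
    ("balance", 3), ("interest_rate", 3), ("payment", 3), ("debt", 3) ]

def dct_name : PySem.Dict Int String := PySem.Dict.ofList
  [ (0, "financial"), (1, "budget"), (2, "portfolio"), (3, "debt") ]

def detect_csv_type_alt (headers : List String) : String :=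
  let best := headers.foldl (fun best h =>
    let r := dct_rank.getD (PySem.Str.lower h) 4
    if r < best then r else best) 4
  dct_name.getD best "generic"

-- ===== PRECONDITION & SPEC =====
def Spec_detect_csv_type (headers : List String) (out : String) : Prop := out = detect_csv_type_alt headers
instance (headers : List String) (out : String) : Decidable (Spec_detect_csv_type headers out) := by unfold Spec_detect_csv_type; infer_instance

-- ===== CLAIM (what is proved, stated in full; the proofs are below) =====
def Claim_equal_detect_csv_type : Prop := ∀ (headers : List String), Dom_detect_csv_type headers → Spec_detect_csv_type headers (detect_csv_type headers)

-- ===== LEMMAS AND PROOFS =====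

-- the rank _RANK gives a lowered header (4 = not a keyword)
def rk (s : String) : Int := dct_rank.getD s 4

theorem rank_items : dct_rank.items =
  [ ("amount", 0), ("transaction", 0), ("description", 0), ("date", 0),
    ("budgeted", 1), ("actual", 1), ("variance", 1), ("category", 1),
    ("shares", 2), ("cost_basis", 2), ("current_value", 2), ("gain", 2),
    ("balance", 3), ("interest_rate", 3), ("payment", 3), ("debt", 3) ] := by rfl

theorem rank_nodup : dct_rank.keys.Nodup := by decide

theorem rk_of_get (s : String) (v : Int) (h : dct_rank.get? s = some v) : rk s = v := by
  simp [rk, PySem.Dict.getD_eq_get?_getD, h]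

theorem rk_mem (s : String) (v : Int) (h : dct_rank.get? s = some v) :
    (s, v) ∈ dct_rank.items := PySem.Dict.mem_items_of_get?_eq_some dct_rank h

theorem rk_bounds (s : String) : 0 ≤ rk s ∧ rk s ≤ 4 := by
  rcases h : dct_rank.get? s with _ | v
  · simp [rk, PySem.Dict.getD_eq_get?_getD, h]
  · have hm := rk_mem s v h
    rw [rank_items] at hm
    rw [rk_of_get s v h]
    simp only [List.mem_cons, List.not_mem_nil, or_false, Prod.mk.injEq] at hm
    omega

theorem rk_eq_iff (s : String) (v : Int) :
    rk s = v ∧ v ≠ 4 ↔ (s, v) ∈ dct_rank.items := by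
  constructor
  · rintro ⟨h0, h4⟩
    rcases h : dct_rank.get? s with _ | w
    · exfalso; apply h4; rw [← h0]; simp [rk, PySem.Dict.getD_eq_get?_getD, h]
    · have := rk_of_get s w h
      have : w = v := by omega
      subst this
      exact rk_mem s w h
  · intro hm
    refine ⟨rk_of_get s v (PySem.Dict.get?_of_mem_items dct_rank hm rank_nodup), ?_⟩
    rw [rank_items] at hm
    simp only [List.mem_cons, List.not_mem_nil, or_false, Prod.mk.injEq] at hm
    omega

theorem rk_eq_zero_iff (s : String) :
    rk s = 0 ↔ s ∈ ["amount", "transaction", "description", "date"] := by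
  have h := rk_eq_iff s 0
  rw [rank_items] at h
  norm_num at h
  simpa using h

theorem rk_eq_one_iff (s : String) :
    rk s = 1 ↔ s ∈ ["budgeted", "actual", "variance", "category"] := by
  have h := rk_eq_iff s 1
  rw [rank_items] at h
  norm_num at h
  simpa using h

theorem rk_eq_two_iff (s : String) :
    rk s = 2 ↔ s ∈ ["shares", "cost_basis", "current_value", "gain"] := by
  have h := rk_eq_iff s 2
  rw [rank_items] at h
  norm_num at h
  simpa using h

theorem rk_eq_three_iff (s : String) :
    rk s = 3 ↔ s ∈ ["balance", "interest_rate", "payment", "debt"] := by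
  have h := rk_eq_iff s 3
  rw [rank_items] at h
  norm_num at h
  simpa using h

-- B's fold over the (lowered) headers
def bfold (L : List String) (b : Int) : Int :=
  L.foldl (fun b s => if rk s < b then rk s else b) b

theorem bfold_le_init : ∀ (L : List String) (b : Int), bfold L b ≤ b := by
  intro L
  induction L with
  | nil => intro b; simp [bfold]
  | cons h t ih =>
    intro b
    simp only [bfold, List.foldl_cons] at *
    split_ifs with hc
    · exact le_trans (ih _) (le_of_lt hc)
    · exact ih b

theorem bfold_le_mem : ∀ (L : List String) (b : Int) (s : String), s ∈ L → bfold L b ≤ rk s := by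
  intro L
  induction L with
  | nil => intro _ _ hs; cases hs
  | cons h t ih =>
    intro b s hs
    rcases List.mem_cons.1 hs with rfl | hm
    · simp only [bfold, List.foldl_cons]
      split_ifs with hc
      · exact bfold_le_init t _
      · exact le_trans (bfold_le_init t _) (le_of_not_gt hc)
    · simp only [bfold, List.foldl_cons] at *
      split_ifs with hc
      · exact ih _ s hm
      · exact ih _ s hm

theorem le_bfold : ∀ (L : List String) (b k : Int), k ≤ b → (∀ s ∈ L, k ≤ rk s) →
    k ≤ bfold L b := by
  intro L
  induction L with
  | nil => intro b k hb _; exact hb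
  | cons h t ih =>
    intro b k hb hL
    simp only [bfold, List.foldl_cons] at *
    split_ifs with hc
    · exact ih _ k (hL h (List.mem_cons_self ..)) (fun s hs => hL s (List.mem_cons_of_mem _ hs))
    · exact ih _ k hb (fun s hs => hL s (List.mem_cons_of_mem _ hs))

theorem bfold_attained : ∀ (L : List String) (b : Int),
    bfold L b = b ∨ ∃ s ∈ L, bfold L b = rk s := by
  intro L
  induction L with
  | nil => intro b; exact Or.inl rfl
  | cons h t ih =>
    intro b
    simp only [bfold, List.foldl_cons] at *
    split_ifs with hc
    · rcases ih (rk h) with h1 | ⟨s, hs, h2⟩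
      · exact Or.inr ⟨h, List.mem_cons_self .., h1⟩
      · exact Or.inr ⟨s, List.mem_cons_of_mem _ hs, h2⟩
    · rcases ih b with h1 | ⟨s, hs, h2⟩
      · exact Or.inl h1
      · exact Or.inr ⟨s, List.mem_cons_of_mem _ hs, h2⟩

-- A's test ↔ existence of a header in this keyword list
theorem any_swap (kws L : List String) :
    (kws.any (fun x => L.contains x) = true) ↔ ∃ s ∈ L, s ∈ kws := by
  simp only [List.any_eq_true, List.contains_iff_mem]
  constructor
  · rintro ⟨x, hx, hc⟩; exact ⟨x, by simpa using hc, hx⟩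
  · rintro ⟨s, hs, hk⟩; exact ⟨s, hk, by simpa using hs⟩

-- ===== VERDICT (by name: the statement is the Claim_ definition above) =====
theorem detect_csv_type_spec : Claim_equal_detect_csv_type := by
  intro headers _
  unfold Spec_detect_csv_type detect_csv_type detect_csv_type_alt
  set L := headers.map PySem.Str.lower with hL
  have hfold : headers.foldl (fun best h =>
      let r := dct_rank.getD (PySem.Str.lower h) 4
      if r < best then r else best) 4 = bfold L 4 := by
    rw [hL, bfold, List.foldl_map]; rfl
  simp only [hfold]
  by_cases a0 : ["amount", "transaction", "description", "date"].any (fun x => L.contains x) = true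
  · obtain ⟨s, hs, hk⟩ := (any_swap _ _).1 a0
    have h0 : rk s = 0 := (rk_eq_zero_iff s).2 hk
    have := bfold_le_mem L 4 s hs
    have := le_bfold L 4 0 (by norm_num) (fun s _ => (rk_bounds s).1)
    have hb : bfold L 4 = 0 := by omega
    rw [a0, if_pos rfl, hb]; decide
  · rw [if_neg (by simpa using a0)]
    have n0 : ∀ s ∈ L, rk s ≠ 0 := by
      intro s hs h0
      exact a0 ((any_swap _ _).2 ⟨s, hs, (rk_eq_zero_iff s).1 h0⟩)
    by_cases a1 : ["budgeted", "actual", "variance", "category"].any (fun x => L.contains x) = true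
    · obtain ⟨s, hs, hk⟩ := (any_swap _ _).1 a1
      have h1 : rk s = 1 := (rk_eq_one_iff s).2 hk
      have := bfold_le_mem L 4 s hs
      have := le_bfold L 4 1 (by norm_num)
        (fun s hsm => by have := (rk_bounds s).1; have := n0 s hsm; omega)
      have hb : bfold L 4 = 1 := by omega
      rw [a1, if_pos rfl, hb]; decide
    · rw [if_neg (by simpa using a1)]
      have n1 : ∀ s ∈ L, rk s ≠ 1 := by
        intro s hs h1
        exact a1 ((any_swap _ _).2 ⟨s, hs, (rk_eq_one_iff s).1 h1⟩)
      by_cases a2 : ["shares", "cost_basis", "current_value", "gain"].any (fun x => L.contains x) = true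
      · obtain ⟨s, hs, hk⟩ := (any_swap _ _).1 a2
        have h2 : rk s = 2 := (rk_eq_two_iff s).2 hk
        have := bfold_le_mem L 4 s hs
        have := le_bfold L 4 2 (by norm_num)
          (fun s hsm => by have := (rk_bounds s).1; have := n0 s hsm; have := n1 s hsm; omega)
        have hb : bfold L 4 = 2 := by omega
        rw [a2, if_pos rfl, hb]; decide
      · rw [if_neg (by simpa using a2)]
        have n2 : ∀ s ∈ L, rk s ≠ 2 := by
          intro s hs h2
          exact a2 ((any_swap _ _).2 ⟨s, hs, (rk_eq_two_iff s).1 h2⟩)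
        by_cases a3 : ["balance", "interest_rate", "payment", "debt"].any (fun x => L.contains x) = true
        · obtain ⟨s, hs, hk⟩ := (any_swap _ _).1 a3
          have h3 : rk s = 3 := (rk_eq_three_iff s).2 hk
          have := bfold_le_mem L 4 s hs
          have := le_bfold L 4 3 (by norm_num)
            (fun s hsm => by
              have := (rk_bounds s).1; have := n0 s hsm; have := n1 s hsm; have := n2 s hsm; omega)
          have hb : bfold L 4 = 3 := by omega
          rw [a3, if_pos rfl, hb]; decide
        · rw [if_neg (by simpa using a3)]
          have n3 : ∀ s ∈ L, rk s ≠ 3 := by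
            intro s hs h3
            exact a3 ((any_swap _ _).2 ⟨s, hs, (rk_eq_three_iff s).1 h3⟩)
          have hb : bfold L 4 = 4 := by
            rcases bfold_attained L 4 with h | ⟨s, hs, h⟩
            · exact h
            · have := rk_bounds s
              have := n0 s hs; have := n1 s hs; have := n2 s hs; have := n3 s hs
              omega
          rw [hb]; decide
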